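-- pv_equiv track=rewrite | github.com/xSuperSunGx/transpostitionalEncryption | encryptionFile.py | skytaleExplinationWithoutSpaces
-- ===== SOURCE A (Python) =====
-- def skytaleExplinationWithoutSpaces(text, key):
--     ret = ""
--     for i in range(key):
--         chars = text[i::key]
--         for j in chars:
--             ret += f"{j}"
--         ret += f"\n"
--
--     return ret
-- ===== SOURCE B (Python) =====
-- def skytaleExplinationWithoutSpaces(text, key):
--     if key <= 0:
--         return ""
--     m = min(key, len(text))
--     rows = [""] * m
--     for idx, ch in enumerate(text):
--         rows[idx % key] += f"{ch}"
--     return "".join(r + "\n" for r in rows) + "\n" * (key - m)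
-- ===== Notes on version B (the rewrite author's own statement) =====
-- stated objective: alternative
-- what changed: A builds each of the key rows with its own stride-key slice of the text; B makes a single enumerate pass over the text, appending each character to rows[idx % key] (rows allocated only for the min(key, len(text)) non-empty ones, trailing empty rows emitted as newlines), then joins the rows.
import Mathlib
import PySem

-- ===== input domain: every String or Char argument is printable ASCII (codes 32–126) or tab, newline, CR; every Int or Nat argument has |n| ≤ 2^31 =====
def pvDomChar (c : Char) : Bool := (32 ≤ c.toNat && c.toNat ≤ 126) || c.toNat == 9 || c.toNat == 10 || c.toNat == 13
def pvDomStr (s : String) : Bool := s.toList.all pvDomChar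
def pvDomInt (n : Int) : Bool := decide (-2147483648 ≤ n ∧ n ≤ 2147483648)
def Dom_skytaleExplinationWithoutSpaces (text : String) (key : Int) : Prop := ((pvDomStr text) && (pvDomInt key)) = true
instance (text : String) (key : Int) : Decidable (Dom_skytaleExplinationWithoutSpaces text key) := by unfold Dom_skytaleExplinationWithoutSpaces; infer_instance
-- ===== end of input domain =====

-- B replaces A's per-row slicing passes (one slice text[i::key] per row) by a single round-robin pass over the text that appends each character to its row (objective: alternative decomposition, same cost).

-- ===== PORT A =====
-- text[i::key]: inside the loop 0 ≤ i < key, so the step key is nonzero and slice? is always `some`; `.getD []` is never the fallback.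
def skytaleExplinationWithoutSpaces (text : String) (key : Int) : String :=
  String.ofList ((PySem.List.pyRange 0 key 1).foldl
    (fun ret i =>
      ((PySem.List.slice? text.toList (some i) none key).getD []).foldl
        (fun r j => r ++ [j]) ret ++ ['\n'])
    [])

-- ===== PORT B =====
def skytaleExplinationWithoutSpaces_alt (text : String) (key : Int) : String :=
  if key ≤ 0 then "" else
    let m : Int := min key (PySem.Str.len text)
    let rows : List (List Char) :=
      (PySem.List.enumerate text.toList 0).foldl
        (fun rows p => rows.modify (PySem.Int.mod p.1 key).toNat (fun r => r ++ [p.2]))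
        (List.replicate m.toNat [])
    String.ofList ((rows.map (fun r => r ++ ['\n'])).flatten ++ List.replicate (key - m).toNat '\n')

-- ===== PRECONDITION & SPEC =====
def Spec_skytaleExplinationWithoutSpaces (text : String) (key : Int) (out : String) : Prop := out = skytaleExplinationWithoutSpaces_alt text key
instance (text : String) (key : Int) (out : String) : Decidable (Spec_skytaleExplinationWithoutSpaces text key out) := by unfold Spec_skytaleExplinationWithoutSpaces; infer_instance

-- ===== CLAIM (what is proved, stated in full; the proofs are below) =====
def Claim_equal_skytaleExplinationWithoutSpaces : Prop := ∀ (text : String) (key : Int), Dom_skytaleExplinationWithoutSpaces text key → Spec_skytaleExplinationWithoutSpaces text key (skytaleExplinationWithoutSpaces text key)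

-- ===== LEMMAS AND PROOFS =====

-- canonical spec of one row: the characters of xs whose absolute position (counting from n) is ≡ T mod K
def rowSel : List Char → Nat → Nat → Nat → List Char
  | [], _, _, _ => []
  | c :: ys, n, T, K => (if n % K = T then [c] else []) ++ rowSel ys (n + 1) T K

lemma filterMap_range_none {α : Type} (f : Nat → Option α) (m N : Nat) (h : m ≤ N)
    (hn : ∀ t, m ≤ t → f t = none) :
    (List.range N).filterMap f = (List.range m).filterMap f := by
  induction N with
  | zero => have hm0 : m = 0 := by omega
            subst hm0; rfl
  | succ N ih =>
    by_cases hm : m = N + 1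
    · subst hm; rfl
    · rw [List.range_succ, List.filterMap_append, ih (by omega)]
      simp [hn N (by omega)]

-- closed form of Python's xs[i::k] for k > 0, 0 ≤ i, with xs.length as an (over-)count of the slice length
lemma slice_closed (xs : List Char) (k i : Int) (hk : 0 < k) (hi : 0 ≤ i) :
    PySem.List.slice? xs (some i) none k
      = some ((List.range xs.length).filterMap (fun (t : Nat) => xs[(i + k * (t : Int)).toNat]?)) := by
  have hk0 : ¬ k = 0 := by omega
  have hkneg : ¬ k < 0 := by omega
  have hineg : ¬ i < 0 := by omega
  simp only [PySem.List.slice?, PySem.List.sliceIndices, if_neg hk0, if_neg hkneg, if_neg hineg,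
    if_pos hk]
  by_cases hin : i < (xs.length : Int)
  · have hmin : min i (xs.length : Int) = i := min_eq_left (by omega)
    rw [hmin, if_pos hin]
    set a : Int := (xs.length : Int) - i + k - 1 with ha
    have hq : k * (a / k) + a % k = a := Int.mul_ediv_add_emod a k
    have hr1 : 0 ≤ a % k := Int.emod_nonneg a (by omega)
    have hr2 : a % k < k := Int.emod_lt_of_pos a hk
    have hq0 : 0 ≤ a / k := Int.ediv_nonneg (by omega) (by omega)
    -- count ≤ xs.length
    have hcle : (a / k).toNat ≤ xs.length := by
      have hnk : (xs.length : Int) ≤ (xs.length : Int) * k :=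
        le_mul_of_one_le_right (by positivity) (by omega)
      have hexp : ((xs.length : Int) + 1) * k = (xs.length : Int) * k + k := by ring
      have : a / k < (xs.length : Int) + 1 := by
        rw [Int.ediv_lt_iff_lt_mul hk, hexp]; omega
      omega
    congr 1
    refine (filterMap_range_none _ _ _ hcle ?_).symm
    intro t hct
    apply List.getElem?_eq_none
    have hqt : (a / k) ≤ (t : Int) := by omega
    have hmono : k * (a / k) ≤ k * (t : Int) :=
      mul_le_mul_of_nonneg_left hqt (by omega)
    omega
  · have hmin : min i (xs.length : Int) = (xs.length : Int) := min_eq_right (by omega)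
    rw [hmin, if_neg (by omega)]
    have hnone : ∀ t, 0 ≤ t → (fun (t : Nat) => xs[(i + k * (t : Int)).toNat]?) t = none := by
      intro t _
      apply List.getElem?_eq_none
      have hmul : (0:Int) ≤ k * (t : Int) := by positivity
      omega
    rw [filterMap_range_none _ 0 _ (by omega) hnone]
    simp

lemma mod_ne_of_lt (I n K : Nat) (h1 : 0 < I) (h2 : I < K) : n % K ≠ (I + n) % K := by
  intro h
  have h' : Nat.ModEq K (0 + n) (I + n) := by simpa [Nat.ModEq] using h
  have h0 : Nat.ModEq K 0 I := h'.add_right_cancel' n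
  have hdvd : K ∣ I := (Nat.modEq_zero_iff_dvd).mp h0.symm
  have := Nat.le_of_dvd h1 hdvd
  omega

lemma rowA (k : Int) (hk : 0 < k) (xs : List Char) :
    ∀ (i : Int) (n : Nat), 0 ≤ i → i < k →
      (List.range xs.length).filterMap (fun (t : Nat) => xs[(i + k * (t : Int)).toNat]?)
        = rowSel xs n ((i.toNat + n) % k.toNat) k.toNat := by
  induction xs with
  | nil => intro i n h0 h1; simp [rowSel]
  | cons c ys ih =>
    intro i n h0 h1
    have hK : 0 < k.toNat := by omega
    by_cases hi0 : i = 0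
    · subst hi0
      have hL : (c :: ys).length = ys.length + 1 := rfl
      rw [hL, List.range_succ_eq_map]
      have hf0 : (fun (t : Nat) => (c :: ys)[((0:Int) + k * (t : Int)).toNat]?) 0 = some c := by
        norm_num
      rw [List.filterMap_cons_some
        (f := fun (t : Nat) => (c :: ys)[((0:Int) + k * (t : Int)).toNat]?) hf0]
      rw [List.filterMap_map]
      have hcongr : ∀ t ∈ List.range ys.length,
          ((fun (t : Nat) => (c :: ys)[((0:Int) + k * (t : Int)).toNat]?) ∘ Nat.succ) t
            = (fun (t : Nat) => ys[((k - 1) + k * (t : Int)).toNat]?) t := by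
        intro t _
        show (c :: ys)[((0:Int) + k * ((Nat.succ t : Nat) : Int)).toNat]?
            = ys[((k - 1) + k * (t : Int)).toNat]?
        have hmul : (0:Int) ≤ k * (t : Int) := by positivity
        have harith : (0:Int) + k * ((t : Int) + 1) = ((k - 1) + k * (t : Int)) + 1 := by ring
        rw [show ((Nat.succ t : Nat) : Int) = (t : Int) + 1 by push_cast; ring]
        rw [harith, Int.toNat_add (by omega) (by norm_num)]
        simp only [Int.toNat_one]
        rw [List.getElem?_cons_succ]
      rw [List.filterMap_congr hcongr]
      rw [ih (k - 1) (n + 1) (by omega) (by omega)]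
      have ht : ((k - 1).toNat + (n + 1)) % k.toNat = ((0:Int).toNat + n) % k.toNat := by
        have he : (k - 1).toNat + (n + 1) = k.toNat + n := by omega
        rw [he]
        simp [Nat.add_mod_left]
      rw [ht]
      have hrs : rowSel (c :: ys) n (((0:Int).toNat + n) % k.toNat) k.toNat
          = [c] ++ rowSel ys (n + 1) (((0:Int).toNat + n) % k.toNat) k.toNat := by
        rw [rowSel, if_pos (by norm_num)]
      rw [hrs]
      rfl
    · have hi1 : 1 ≤ i := by omega
      have hL : (c :: ys).length = ys.length + 1 := rfl
      rw [hL, List.range_succ, List.filterMap_append]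
      have hmulL : (ys.length : Int) ≤ k * (ys.length : Int) :=
        le_mul_of_one_le_left (by positivity) (by omega)
      have hlast : (c :: ys)[(i + k * ((ys.length : Nat) : Int)).toNat]? = none := by
        apply List.getElem?_eq_none
        simp only [List.length_cons]
        omega
      have hsing : List.filterMap (fun (t : Nat) => (c :: ys)[(i + k * (t : Int)).toNat]?) [ys.length] = [] := by
        simp [hlast]
      rw [hsing, List.append_nil]
      have hcongr : ∀ t ∈ List.range ys.length,
          (fun (t : Nat) => (c :: ys)[(i + k * (t : Int)).toNat]?) t
            = (fun (t : Nat) => ys[((i - 1) + k * (t : Int)).toNat]?) t := by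
        intro t _
        show (c :: ys)[(i + k * (t : Int)).toNat]? = ys[((i - 1) + k * (t : Int)).toNat]?
        have hmul : (0:Int) ≤ k * (t : Int) := by positivity
        have harith : i + k * (t : Int) = ((i - 1) + k * (t : Int)) + 1 := by ring
        rw [harith, Int.toNat_add (by omega) (by norm_num)]
        simp only [Int.toNat_one]
        rw [List.getElem?_cons_succ]
      rw [List.filterMap_congr hcongr, ih (i - 1) (n + 1) (by omega) (by omega)]
      have ht : ((i - 1).toNat + (n + 1)) = i.toNat + n := by omega
      rw [ht]
      have hne : n % k.toNat ≠ (i.toNat + n) % k.toNat :=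
        mod_ne_of_lt i.toNat n k.toNat (by omega) (by omega)
      rw [show rowSel (c :: ys) n ((i.toNat + n) % k.toNat) k.toNat
            = rowSel ys (n + 1) ((i.toNat + n) % k.toNat) k.toNat from by
        rw [rowSel, if_neg hne, List.nil_append]]

lemma rowSel_nil (xs : List Char) (T K : Nat) :
    ∀ n : Nat, n + xs.length ≤ T → T < K → rowSel xs n T K = [] := by
  induction xs with
  | nil => intro n _ _; rfl
  | cons c ys ih =>
    intro n h1 h2
    have hlen : (c :: ys).length = ys.length + 1 := rfl
    rw [hlen] at h1
    have hx : n % K ≠ T := by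
      rw [Nat.mod_eq_of_lt (by omega)]; omega
    rw [rowSel, if_neg hx, List.nil_append]
    exact ih (n + 1) (by omega) h2

lemma foldB_get (K : Nat) (xs : List Char) :
    ∀ (n : Nat) (rows : List (List Char)) (j : Nat),
      ((PySem.List.enumerate xs ((n : Nat) : Int)).foldl
        (fun rows p => rows.modify (PySem.Int.mod p.1 ((K : Nat) : Int)).toNat (fun r => r ++ [p.2])) rows)[j]?
        = (rows[j]?).map (· ++ rowSel xs n j K) := by
  induction xs with
  | nil =>
    intro n rows j
    show rows[j]? = _
    cases h : rows[j]? <;> simp [rowSel]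
  | cons c ys ih =>
    intro n rows j
    rw [PySem.List.enumerate_cons, List.foldl_cons]
    rw [show ((n : Int) + 1) = (((n + 1 : Nat) : Nat) : Int) by push_cast; ring]
    rw [ih (n + 1)]
    rw [List.getElem?_modify]
    have hmod : (PySem.Int.mod ((n : Nat) : Int) ((K : Nat) : Int)).toNat = n % K := by
      rw [PySem.Int.mod_natCast]; omega
    rw [hmod]
    cases hrj : rows[j]? with
    | none => simp
    | some r =>
      simp only [Option.map_some]
      by_cases hc : n % K = j
      · simp [hc, rowSel, List.append_assoc]
      · simp [hc, rowSel]

lemma flatten_replicate_singleton (n : Nat) (c : Char) :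
    (List.replicate n [c]).flatten = List.replicate n c := by
  induction n with
  | zero => rfl
  | succ n ih => simp [List.replicate_succ, ih]

-- ===== VERDICT (by name: the statement is the Claim_ definition above) =====
theorem skytaleExplinationWithoutSpaces_spec : Claim_equal_skytaleExplinationWithoutSpaces := by
  intro text key _
  unfold Spec_skytaleExplinationWithoutSpaces
  by_cases hk : key ≤ 0
  · unfold skytaleExplinationWithoutSpaces skytaleExplinationWithoutSpaces_alt
    rw [PySem.List.pyRange_one_eq_nil hk, if_pos hk]
    rfl
  · have hkpos : 0 < key := by omega
    obtain ⟨K, hkey⟩ : ∃ K : Nat, key = (K : Int) := ⟨key.toNat, by omega⟩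
    subst hkey
    have hKpos : 0 < K := by omega
    have hknot : ¬ (K : Int) ≤ 0 := by omega
    -- abbreviations (plain hypotheses, not lets)
    have hM : min K text.toList.length = min K text.toList.length := rfl
    -- one row of A is rowSel
    have hA1 : ∀ t ∈ List.range K,
        ((fun i => (PySem.List.slice? text.toList (some i) none (K : Int)).getD [] ++ ['\n'])
            ∘ (fun (t : Nat) => (t : Int))) t
          = (fun t => rowSel text.toList 0 t K ++ ['\n']) t := by
      intro t ht
      have htK : t < K := List.mem_range.mp ht
      have h0 : (0:Int) ≤ (t : Int) := by positivity
      have h1 : (t : Int) < (K : Int) := by omega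
      simp only [Function.comp]
      rw [slice_closed text.toList (K : Int) (t : Int) (by omega) h0, Option.getD_some,
        rowA (K : Int) (by omega) text.toList (t : Int) 0 h0 h1]
      rw [show ((((t : Int)).toNat + 0) % ((K : Int)).toNat) = t from by
        simp [Nat.mod_eq_of_lt htK]]
      rw [show ((K : Int)).toNat = K from by simp]
    -- A as a flatten of rows
    have hAfold : skytaleExplinationWithoutSpaces text (K : Int)
        = String.ofList (((List.range K).map (fun t => rowSel text.toList 0 t K ++ ['\n'])).flatten) := by
      unfold skytaleExplinationWithoutSpaces
      simp only [PySem.List.foldl_append_singleton, List.append_assoc]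
      rw [PySem.List.foldl_append_eq_flatMap
        (fun i => (PySem.List.slice? text.toList (some i) none (K : Int)).getD [] ++ ['\n'])
        (PySem.List.pyRange 0 (K : Int) 1) [], List.nil_append]
      rw [PySem.List.pyRange_zero_nat, List.flatMap_def, List.map_map]
      rw [List.map_congr_left hA1]
    -- B's rows compute rowSel
    have hrows : ((PySem.List.enumerate text.toList 0).foldl
          (fun rows p => rows.modify (PySem.Int.mod p.1 (K : Int)).toNat (fun r => r ++ [p.2]))
          (List.replicate (min K text.toList.length) []))
        = (List.range (min K text.toList.length)).map (fun j => rowSel text.toList 0 j K) := by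
      apply List.ext_getElem?
      intro j
      have hB := foldB_get K text.toList 0 (List.replicate (min K text.toList.length) []) j
      rw [Nat.cast_zero] at hB
      rw [hB]
      by_cases hj : j < min K text.toList.length
      · rw [List.getElem?_replicate, if_pos hj, List.getElem?_map, List.getElem?_range hj]
        simp
      · rw [List.getElem?_replicate, if_neg hj, List.getElem?_map,
          List.getElem?_eq_none (by rw [List.length_range]; omega)]
        rfl
    -- B simplified
    have hBfold : skytaleExplinationWithoutSpaces_alt text (K : Int)
        = String.ofList ((((List.range (min K text.toList.length)).map
              (fun j => rowSel text.toList 0 j K)).map (fun r => r ++ ['\n'])).flatten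
            ++ List.replicate (K - min K text.toList.length) '\n') := by
      unfold skytaleExplinationWithoutSpaces_alt
      rw [if_neg hknot]
      have hlen : PySem.Str.len text = (text.toList.length : Int) := PySem.Str.len_eq text
      simp only [hlen]
      have hmin : min (K : Int) (text.toList.length : Int) = ((min K text.toList.length : Nat) : Int) := by
        omega
      rw [hmin, Int.toNat_natCast]
      have hsub : ((K : Int) - ((min K text.toList.length : Nat) : Int)).toNat
          = K - min K text.toList.length := by omega
      rw [hsub, hrows]
    rw [hAfold, hBfold]
    congr 1
    rw [List.map_map]
    have hsplit : List.range K
        = List.range (min K text.toList.length)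
          ++ List.map (fun x => min K text.toList.length + x) (List.range (K - min K text.toList.length)) := by
      conv_lhs => rw [show K = min K text.toList.length + (K - min K text.toList.length) by omega]
      rw [List.range_add]
    rw [hsplit, List.map_append, List.flatten_append]
    congr 1
    have hconst : ∀ u ∈ List.range (K - min K text.toList.length),
        ((fun t => rowSel text.toList 0 t K ++ ['\n']) ∘ (fun x => min K text.toList.length + x)) u
          = (fun _ => ['\n']) u := by
      intro u hu
      have huK : u < K - min K text.toList.length := List.mem_range.mp hu
      simp only [Function.comp]
      rw [rowSel_nil text.toList (min K text.toList.length + u) K 0 (by omega) (by omega),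
        List.nil_append]
    rw [List.map_map, List.map_congr_left hconst, List.map_const', List.length_range,
      flatten_replicate_singleton]
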